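-- pv_equiv track=rewrite | github.com/lemontime0106/Algorithm | 프로그래머스/2/131127. 할인 행사/할인 행사.py | solution
-- ===== SOURCE A (Python) =====
-- def solution(want, number, discount):
--     answer = 0
--     N = len(want)
--     want_dict = {}
--     for i in range(N):
--         want_dict[want[i]] = number[i]
--
--     M = len(discount)
--     days = sum(number)
--
--     for i in range(M-days+1):
--         cart = {}
--         for j in range(days):
--             temp = discount[i:days+i]
--             if temp[j] not in cart:
--                 cart[temp[j]] = 1
--             else:
--                 cart[temp[j]] += 1
--
--         if cart == want_dict:
--             answer += 1
--
--     return answer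
-- ===== SOURCE B (Python) =====
-- def solution(want, number, discount):
--     want_dict = dict(zip(want, number))
--     days = sum(number)
--     M = len(discount)
--     if M - days + 1 <= 0:
--         return 0
--     freq = {}
--     # bad = number of keys on which freq and want_dict currently disagree
--     bad = len(want_dict)
--
--     def change(item, delta, bad):
--         before = freq.get(item) == want_dict.get(item)
--         c = freq.get(item, 0) + delta
--         if c:
--             freq[item] = c
--         else:
--             freq.pop(item, None)
--         after = freq.get(item) == want_dict.get(item)
--         return bad + before - after
--
--     for item in discount[:days]:
--         bad = change(item, 1, bad)
--     answer = 1 if bad == 0 else 0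
--     for i in range(days, M):
--         bad = change(discount[i], 1, bad)
--         bad = change(discount[i - days], -1, bad)
--         if bad == 0:
--             answer += 1
--     return answer
-- ===== Notes on version B (the rewrite author's own statement) =====
-- stated objective: alternative
-- what changed: A rebuilds a fresh counter dict (re-slicing the list inside the inner loop) and compares it to want_dict for every window; B keeps one sliding-window frequency dict (deleting keys whose count drops to 0) plus a running count of keys on which it disagrees with want_dict, updated only at the two boundary items of each window; Pre_ excludes inputs where number is shorter than want (A raises IndexError) and inputs whose number sums to a negative window length, where B's own slicing/indexing raises IndexError while A degenerately counts empty windows.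
-- outside the precondition, e.g. on solution(['a'], [-1], ['a', 'b']): A returns 0, B raises IndexError
import Mathlib
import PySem

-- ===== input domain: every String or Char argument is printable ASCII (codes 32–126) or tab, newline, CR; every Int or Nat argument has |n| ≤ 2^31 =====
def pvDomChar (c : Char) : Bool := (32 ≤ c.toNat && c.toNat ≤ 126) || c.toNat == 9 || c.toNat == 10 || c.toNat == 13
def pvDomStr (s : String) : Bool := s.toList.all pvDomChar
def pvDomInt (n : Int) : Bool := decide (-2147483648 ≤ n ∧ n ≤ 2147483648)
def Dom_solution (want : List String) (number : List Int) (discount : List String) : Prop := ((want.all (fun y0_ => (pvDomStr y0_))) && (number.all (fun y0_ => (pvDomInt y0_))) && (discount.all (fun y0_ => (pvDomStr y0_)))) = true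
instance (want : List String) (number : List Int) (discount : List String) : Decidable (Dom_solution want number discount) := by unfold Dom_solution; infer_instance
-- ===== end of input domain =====

-- B replaces A's per-window recount (rebuilding and comparing a counter dict for every window)
-- by one sliding-window frequency dict updated incrementally with a mismatch counter; objective: alternative algorithm.

-- ===== PORT A =====
-- Python's `==` on dicts: order-insensitive map equality (PySem.Dict `=` compares insertion order, so spell it out)
def pyDictEq (d e : PySem.Dict String Int) : Bool :=
  (d.keys.all (fun k => d.get? k == e.get? k)) && (e.keys.all (fun k => d.get? k == e.get? k))

def solution (want : List String) (number : List Int) (discount : List String) : Int :=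
  let N : Int := PySem.List.len want
  let want_dict : PySem.Dict String Int :=
    (PySem.List.pyRange 0 N).foldl
      (fun d i => d.insert (PySem.List.pyGetD want i "") (PySem.List.pyGetD number i 0))
      PySem.Dict.empty
  let M : Int := PySem.List.len discount
  let days : Int := number.sum
  (PySem.List.pyRange 0 (M - days + 1)).foldl
    (fun answer i =>
      let cart : PySem.Dict String Int :=
        (PySem.List.pyRange 0 days).foldl
          (fun cart j =>
            let temp := PySem.List.slice discount (some i) (some (days + i))
            let x := PySem.List.pyGetD temp j ""
            if cart.contains x = false then cart.insert x 1
            else cart.insert x (cart.getD x 0 + 1))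
          PySem.Dict.empty
      if pyDictEq cart want_dict then answer + 1 else answer)
    0

-- ===== PORT B =====
-- B's helper `change`: add delta to item's window count (deleting the key at count 0) and
-- update the running number of keys on which freq and want_dict disagree.
def pvChange (W : PySem.Dict String Int) (st : PySem.Dict String Int × Int)
    (item : String) (delta : Int) : PySem.Dict String Int × Int :=
  let before : Bool := st.1.get? item == W.get? item
  let c : Int := st.1.getD item 0 + delta
  let f : PySem.Dict String Int := if c ≠ 0 then st.1.insert item c else st.1.erase item
  let after : Bool := f.get? item == W.get? item
  (f, st.2 + (if before then 1 else 0) - (if after then 1 else 0))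

def solution_alt (want : List String) (number : List Int) (discount : List String) : Int :=
  let want_dict : PySem.Dict String Int :=
    (want.zip number).foldl (fun d p => d.insert p.1 p.2) PySem.Dict.empty
  let days : Int := number.sum
  let M : Int := PySem.List.len discount
  if M - days + 1 ≤ 0 then 0
  else
    let st0 : PySem.Dict String Int × Int :=
      (PySem.List.slice discount none (some days)).foldl
        (fun st item => pvChange want_dict st item 1)
        (PySem.Dict.empty, ((want_dict.size : Nat) : Int))
    let answer : Int := if st0.2 = 0 then 1 else 0
    ((PySem.List.pyRange days M).foldl
        (fun q i =>
          let st := pvChange want_dict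
            (pvChange want_dict q.1 (PySem.List.pyGetD discount i "") 1)
            (PySem.List.pyGetD discount (i - days) "") (-1)
          (st, if st.2 = 0 then q.2 + 1 else q.2))
        (st0, answer)).2

-- ===== PRECONDITION & SPEC =====
-- Pre_ excludes inputs where number is shorter than want, on which A raises IndexError, and
-- inputs whose number sums to a negative window length, where B's own slicing/indexing raises
-- IndexError while A degenerately counts empty windows.
def Pre_solution (want : List String) (number : List Int) (discount : List String) : Prop :=
  want.length ≤ number.length ∧ 0 ≤ number.sum
instance (want : List String) (number : List Int) (discount : List String) : Decidable (Pre_solution want number discount) := by unfold Pre_solution; infer_instance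

def pvWitness_solution : List String × List Int × List String := (["a"], [1], ["a", "b"])

def Spec_solution (want : List String) (number : List Int) (discount : List String) (out : Int) : Prop := out = solution_alt want number discount
instance (want : List String) (number : List Int) (discount : List String) (out : Int) : Decidable (Spec_solution want number discount out) := by unfold Spec_solution; infer_instance

-- ===== CLAIM (what is proved, stated in full; the proofs are below) =====
def Claim_equal_solution : Prop := ∀ (want : List String) (number : List Int) (discount : List String), Dom_solution want number discount → Pre_solution want number discount → Spec_solution want number discount (solution want number discount)

-- ===== LEMMAS AND PROOFS =====

-- B's want_dict, named for proof bookkeeping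
def pvW (want : List String) (number : List Int) : PySem.Dict String Int :=
  (want.zip number).foldl (fun d p => d.insert p.1 p.2) PySem.Dict.empty

-- the window of length D starting at t
def pvWin (discount : List String) (D t : Nat) : List String := (discount.drop t).take D

-- "window t matches want_dict", exactly as A tests it
def pvMatched (W : PySem.Dict String Int) (discount : List String) (D : Nat) (t : Nat) : Bool :=
  pyDictEq (PySem.Dict.counter (pvWin discount D t)) W

-- the mismatch count B tracks: keys where freq and want_dict disagree
def pvBad (W f : PySem.Dict String Int) : Int :=
  ((W.keys.countP (fun k => f.get? k != W.get? k) : Nat) : Int)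
  + ((f.keys.countP (fun k => !W.contains k) : Nat) : Int)

-- the invariant of B's sliding state: c is the current window-count function
def pvInv (W : PySem.Dict String Int) (c : String → Int) (st : PySem.Dict String Int × Int) : Prop :=
  st.1.keys.Nodup ∧ (∀ k, st.1.get? k = if c k = 0 then none else some (c k)) ∧
  st.2 = pvBad W st.1

lemma pv_countP_update (l : List String) (hl : l.Nodup) (a : String) (ha : a ∈ l)
    (p q : String → Bool) (hpq : ∀ x ∈ l, x ≠ a → p x = q x) :
    l.countP q + (if p a then 1 else 0) = l.countP p + (if q a then 1 else 0) := by
  induction l with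
  | nil => cases ha
  | cons x t ih =>
    by_cases hxa : x = a
    · subst hxa
      have hx : x ∉ t := (List.nodup_cons.mp hl).1
      have ht : t.countP q = t.countP p :=
        List.countP_congr fun y hy => by rw [hpq y (List.mem_cons_of_mem _ hy) (fun h => hx (h ▸ hy))]
      by_cases hp : p x <;> by_cases hq : q x <;>
        simp [List.countP_cons, ht, hp, hq] <;> omega
    · have hat : a ∈ t := by
        rcases List.mem_cons.mp ha with h | h
        · exact absurd h.symm hxa
        · exact h
      have hx : p x = q x := hpq x (by simp) hxa
      have := ih (List.nodup_cons.mp hl).2 hat (fun y hy hya => hpq y (List.mem_cons_of_mem _ hy) hya)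
      by_cases hq : q x <;> simp [List.countP_cons, ← hx, hq] at this ⊢ <;> omega

lemma pv_get?_eq_some_getD (d : PySem.Dict String Int) (k : String) (hk : d.contains k = true) :
    d.get? k = some (d.getD k 0) := by
  rw [PySem.Dict.contains_eq_isSome_get?] at hk
  obtain ⟨v, hv⟩ := Option.isSome_iff_exists.mp hk
  rw [hv, PySem.Dict.getD_eq_get?_getD, hv]
  rfl

-- erase = filter on items: lookup after erase
lemma pv_get?_erase (d : PySem.Dict String Int) (k k' : String) :
    (d.erase k).get? k' = if k' = k then none else d.get? k' := by
  obtain ⟨items⟩ := d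
  induction items with
  | nil => by_cases h : k' = k <;> simp [PySem.Dict.erase, PySem.Dict.get?, h]
  | cons p t ih =>
    by_cases hpk : p.1 = k <;> by_cases hpk' : p.1 = k' <;>
      by_cases hkk' : k' = k <;>
      simp_all [PySem.Dict.erase, PySem.Dict.get?, List.find?_cons, List.filter_cons]

lemma pv_keys_erase (d : PySem.Dict String Int) (k : String) :
    (d.erase k).keys = d.keys.filter (fun x => !(x == k)) := by
  obtain ⟨items⟩ := d
  induction items with
  | nil => simp [PySem.Dict.erase, PySem.Dict.keys]
  | cons p t ih =>
    by_cases hpk : p.1 = k <;>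
      simp_all [PySem.Dict.erase, PySem.Dict.keys, List.filter_cons]

-- dropping one element of a Nodup list from a count
lemma pv_countP_erase_key (l : List String) (hl : l.Nodup) (a : String) (q : String → Bool) :
    l.countP q = (l.filter (fun x => !(x == a))).countP q
      + (if a ∈ l then (if q a then 1 else 0) else 0) := by
  induction l with
  | nil => simp
  | cons x t ih =>
    have hnd := List.nodup_cons.mp hl
    by_cases hxa : x = a
    · subst hxa
      have hf : t.filter (fun y => !(y == x)) = t :=
        List.filter_eq_self.mpr (fun y hy => by
          simp only [Bool.not_eq_eq_eq_not, Bool.not_true, beq_eq_false_iff_ne]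
          exact fun h => hnd.1 (h ▸ hy))
      by_cases hq : q x <;> simp [List.filter_cons, hf, List.countP_cons, hq]
    · have := ih hnd.2
      by_cases hq : q x <;> by_cases hmem : a ∈ t <;>
        simp_all [List.filter_cons, List.countP_cons, hxa, Ne.symm hxa] <;>
        split_ifs at * <;> omega

-- Python dict equality, characterised pointwise
lemma pv_pyDictEq_iff_forall (d e : PySem.Dict String Int) :
    pyDictEq d e = true ↔ ∀ k, d.get? k = e.get? k := by
  constructor
  · intro h k
    simp only [pyDictEq, Bool.and_eq_true, List.all_eq_true, beq_iff_eq] at h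
    by_cases hd : k ∈ d.keys
    · exact h.1 k hd
    · by_cases he : k ∈ e.keys
      · exact h.2 k he
      · rw [(PySem.Dict.get?_eq_none_iff_not_mem_keys _ _).mpr hd,
          (PySem.Dict.get?_eq_none_iff_not_mem_keys _ _).mpr he]
  · intro h
    simp only [pyDictEq, Bool.and_eq_true, List.all_eq_true, beq_iff_eq]
    exact ⟨fun k _ => h k, fun k _ => h k⟩

-- the counter of a list, as a lookup function
lemma pv_counter_get? (l : List String) (k : String) :
    (PySem.Dict.counter l).get? k
      = if ((l.count k : Nat) : Int) = 0 then none else some ((l.count k : Nat) : Int) := by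
  by_cases hm : k ∈ l
  · have hc : (PySem.Dict.counter l).contains k = true := by
      rw [PySem.Dict.contains_iff_mem_keys, PySem.Dict.keys_counter]
      exact (PySem.Set.mem_ofList l k).mpr hm
    have hpos : 0 < l.count k := List.count_pos_iff.mpr hm
    rw [pv_get?_eq_some_getD _ _ hc, PySem.Dict.getD_counter]
    have hne : ((l.count k : Nat) : Int) ≠ 0 := by exact_mod_cast (by omega : l.count k ≠ 0)
    rw [if_neg hne]
  · have hc0 : l.count k = 0 := List.count_eq_zero.mpr hm
    have hn : (PySem.Dict.counter l).get? k = none := by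
      rw [PySem.Dict.get?_eq_none_iff_not_mem_keys, PySem.Dict.keys_counter]
      simpa [PySem.Set.mem_ofList] using hm
    rw [hn, hc0]
    simp

-- one `change` step preserves the invariant, moving the count at the touched key
lemma pvChange_inv (W : PySem.Dict String Int) (hW : W.keys.Nodup) (c : String → Int)
    (st : PySem.Dict String Int × Int) (item : String) (delta : Int) (h : pvInv W c st) :
    pvInv W (fun k => if k = item then c k + delta else c k) (pvChange W st item delta) := by
  obtain ⟨hnd, hget, hbad⟩ := h
  have hold : st.1.getD item 0 = c item := by
    rw [PySem.Dict.getD_eq_get?_getD, hget item]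
    by_cases h0 : c item = 0 <;> simp [h0]
  have hcontains : st.1.contains item = (!decide (c item = 0)) := by
    rw [PySem.Dict.contains_eq_isSome_get?, hget item]
    by_cases h0 : c item = 0 <;> simp [h0]
  -- term1 bookkeeping: countP over W.keys changes at most at `item`
  have hT1 : ∀ d' : PySem.Dict String Int, (∀ k, k ≠ item → d'.get? k = st.1.get? k) →
      (W.keys.countP (fun k => d'.get? k != W.get? k) : Int)
      = (W.keys.countP (fun k => st.1.get? k != W.get? k) : Int)
        - (if item ∈ W.keys then (if st.1.get? item != W.get? item then 1 else 0) else 0)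
        + (if item ∈ W.keys then (if d'.get? item != W.get? item then 1 else 0) else 0) := by
    intro d' hd'
    by_cases hm : item ∈ W.keys
    · have := pv_countP_update W.keys hW item hm
        (fun k => st.1.get? k != W.get? k) (fun k => d'.get? k != W.get? k)
        (fun x _ hx => by show (st.1.get? x != W.get? x) = (d'.get? x != W.get? x); rw [hd' x hx])
      rw [if_pos hm, if_pos hm]
      split_ifs at this ⊢ <;> push_cast <;> omega
    · have hc : W.keys.countP (fun k => d'.get? k != W.get? k)
          = W.keys.countP (fun k => st.1.get? k != W.get? k) :=
        List.countP_congr (fun x hx => by rw [hd' x (fun hh => hm (hh ▸ hx))])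
      rw [if_neg hm, if_neg hm, hc]
      ring
  simp only [pvChange, hold]
  by_cases hv : c item + delta ≠ 0
  · -- insert branch
    rw [if_pos hv]
    refine ⟨PySem.Dict.nodup_keys_insert _ _ _ hnd, ?_, ?_⟩
    · intro k
      beta_reduce
      rw [PySem.Dict.get?_insert]
      by_cases hk : k = item
      · simp [hk, hv]
      · rw [if_neg hk, hget k, if_neg hk]
    · show st.2 + _ - _ = pvBad W (st.1.insert item (c item + delta))
      have hg' : ∀ k, k ≠ item → (st.1.insert item (c item + delta)).get? k = st.1.get? k :=
        fun k hk => by rw [PySem.Dict.get?_insert, if_neg hk]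
      have h1 := hT1 (st.1.insert item (c item + delta)) hg'
      -- term2: countP of keys outside W
      have h2 : ((st.1.insert item (c item + delta)).keys.countP (fun k => !W.contains k) : Int)
          = (st.1.keys.countP (fun k => !W.contains k) : Int)
            + (if st.1.contains item = false ∧ W.contains item = false then 1 else 0) := by
        by_cases hco : st.1.contains item
        · rw [PySem.Dict.keys_insert_of_contains _ _ hco]
          simp [hco]
        · have hco' : st.1.contains item = false := by simpa using hco
          rw [PySem.Dict.keys_insert_of_not_contains _ _ hco', List.countP_append]
          by_cases hWc : W.contains item <;> simp [hco', hWc] <;> push_cast <;> omega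
      rw [hbad, pvBad, pvBad, h1, h2]
      -- relate the `before`/`after` booleans with the membership facts
      have hWget : W.contains item = true → W.get? item = some (W.getD item 0) :=
        fun hc' => pv_get?_eq_some_getD W item hc'
      have hWnone : W.contains item = false → W.get? item = none := by
        intro hc'
        rw [PySem.Dict.get?_eq_none_iff_not_mem_keys]
        intro hm
        rw [(PySem.Dict.contains_iff_mem_keys _ _).mpr hm] at hc'
        cases hc'
      have hmemW : (item ∈ W.keys) ↔ W.contains item = true :=
        (PySem.Dict.contains_iff_mem_keys _ _).symm
      have hnew : (st.1.insert item (c item + delta)).get? item = some (c item + delta) :=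
        PySem.Dict.get?_insert_self _ _ _
      by_cases hWc : W.contains item = true
      · have hW' := hWget hWc
        rw [if_pos (hmemW.mpr hWc), if_pos (hmemW.mpr hWc), hnew, hW']
        have : ¬(st.1.contains item = false ∧ W.contains item = false) := by
          intro hh
          rw [hWc] at hh
          exact absurd hh.2 (by simp)
        rw [if_neg this]
        rcases Bool.eq_false_or_eq_true (st.1.get? item == some (W.getD item 0)) with hb | hb <;>
          rcases Bool.eq_false_or_eq_true (some (c item + delta) == some (W.getD item 0)) with ha | ha <;>
          simp [bne, hb, ha] <;> omega
      · have hWc' : W.contains item = false := by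
          cases hcc : W.contains item
          · rfl
          · exact absurd hcc hWc
        have hW' := hWnone hWc'
        rw [if_neg (fun hm => hWc (hmemW.mp hm)), if_neg (fun hm => hWc (hmemW.mp hm)), hnew, hW']
        simp only [hcontains, hWc']
        by_cases h0 : c item = 0 <;>
          simp [h0, hget item] <;> omega
  · -- erase branch
    rw [if_neg hv]
    have hv0 : c item + delta = 0 := by omega
    refine ⟨?_, ?_, ?_⟩
    · rw [pv_keys_erase]
      exact hnd.filter _
    · intro k
      beta_reduce
      rw [pv_get?_erase]
      by_cases hk : k = item
      · simp [hk, hv0]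
      · rw [if_neg hk, hget k, if_neg hk]
    · show st.2 + _ - _ = pvBad W (st.1.erase item)
      have hg' : ∀ k, k ≠ item → (st.1.erase item).get? k = st.1.get? k :=
        fun k hk => by rw [pv_get?_erase, if_neg hk]
      have h1 := hT1 (st.1.erase item) hg'
      have h2 : ((st.1.erase item).keys.countP (fun k => !W.contains k) : Int)
          = (st.1.keys.countP (fun k => !W.contains k) : Int)
            - (if item ∈ st.1.keys ∧ W.contains item = false then 1 else 0) := by
        rw [pv_keys_erase]
        have := pv_countP_erase_key st.1.keys hnd item (fun k => !W.contains k)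
        by_cases hm : item ∈ st.1.keys <;> by_cases hWc : W.contains item = true <;>
          simp [hm, hWc] at this ⊢ <;> push_cast <;> omega
      rw [hbad, pvBad, pvBad, h1, h2]
      have herase : (st.1.erase item).get? item = none := by
        rw [pv_get?_erase, if_pos rfl]
      have hmemW : (item ∈ W.keys) ↔ W.contains item = true :=
        (PySem.Dict.contains_iff_mem_keys _ _).symm
      have hmemf : (item ∈ st.1.keys) ↔ st.1.contains item = true :=
        (PySem.Dict.contains_iff_mem_keys _ _).symm
      by_cases hWc : W.contains item = true
      · have hW' := pv_get?_eq_some_getD W item hWc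
        have hnomem : ¬(item ∈ st.1.keys ∧ W.contains item = false) := by
          intro hh
          rw [hWc] at hh
          exact absurd hh.2 (by simp)
        rw [if_pos (hmemW.mpr hWc), if_pos (hmemW.mpr hWc), herase, hW', if_neg hnomem]
        rcases Bool.eq_false_or_eq_true (st.1.get? item == some (W.getD item 0)) with hb | hb <;>
          simp [bne, hb] <;> omega
      · have hWc' : W.contains item = false := by
          cases hcc : W.contains item
          · rfl
          · exact absurd hcc hWc
        have hW' : W.get? item = none := by
          rw [PySem.Dict.get?_eq_none_iff_not_mem_keys]
          exact fun hm => hWc (hmemW.mp hm)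
        rw [if_neg (fun hm => hWc (hmemW.mp hm)), if_neg (fun hm => hWc (hmemW.mp hm)),
          herase, hW']
        simp only [hcontains, hWc'] at *
        by_cases h0 : c item = 0 <;>
          simp [h0, hget item, hmemf, hcontains, hWc'] <;> omega

-- the mismatch counter is 0 exactly when freq equals want_dict as a map
lemma pvInv_zero_iff (W : PySem.Dict String Int) (c : String → Int)
    (st : PySem.Dict String Int × Int) (h : pvInv W c st) :
    (st.2 = 0 ↔ ∀ k, st.1.get? k = W.get? k) := by
  obtain ⟨hnd, hget, hbad⟩ := h
  rw [hbad]
  constructor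
  · intro h0
    have h1 : W.keys.countP (fun k => st.1.get? k != W.get? k) = 0 := by
      unfold pvBad at h0
      omega
    have h2 : st.1.keys.countP (fun k => !W.contains k) = 0 := by
      unfold pvBad at h0
      omega
    rw [List.countP_eq_zero] at h1 h2
    intro k
    by_cases hkW : k ∈ W.keys
    · have := h1 k hkW
      simpa using this
    · have hWn : W.get? k = none := (PySem.Dict.get?_eq_none_iff_not_mem_keys _ _).mpr hkW
      by_cases hkf : k ∈ st.1.keys
      · have := h2 k hkf
        have hWc : W.contains k = true := by simpa using this
        exact absurd ((PySem.Dict.contains_iff_mem_keys _ _).mp hWc) hkW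
      · rw [(PySem.Dict.get?_eq_none_iff_not_mem_keys _ _).mpr hkf, hWn]
  · intro hall
    have h1 : W.keys.countP (fun k => st.1.get? k != W.get? k) = 0 :=
      List.countP_eq_zero.mpr (fun k _ => by simp [hall k])
    have h2 : st.1.keys.countP (fun k => !W.contains k) = 0 :=
      List.countP_eq_zero.mpr (fun k hk => by
        have hsome : (st.1.get? k).isSome := by
          rw [← PySem.Dict.contains_eq_isSome_get?]
          exact (PySem.Dict.contains_iff_mem_keys _ _).mpr hk
        rw [hall k, ← PySem.Dict.contains_eq_isSome_get?] at hsome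
        simp [hsome])
    unfold pvBad
    omega

-- match test: the counter equals B's tracked zero-mismatch condition
lemma pv_match_iff (W : PySem.Dict String Int) (discount : List String) (D t : Nat)
    (st : PySem.Dict String Int × Int)
    (h : pvInv W (fun k => ((pvWin discount D t).count k : Int)) st) :
    (st.2 = 0 ↔ pvMatched W discount D t = true) := by
  rw [pvInv_zero_iff W _ st h, pvMatched, pv_pyDictEq_iff_forall]
  have hpt : ∀ k, (PySem.Dict.counter (pvWin discount D t)).get? k = st.1.get? k := by
    intro k
    rw [pv_counter_get?, h.2.1 k]
  exact ⟨fun hh k => (hpt k).trans (hh k), fun hh k => (hpt k).symm.trans (hh k)⟩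

-- a 0/1 count over a python range is a count over List.range
lemma pv_countP_pyRange (p : Int → Bool) (q : Nat → Bool) (n : Nat)
    (h : ∀ t : Nat, t < n → p ((t : Nat) : Int) = q t) :
    List.countP p (PySem.List.pyRange 0 ((n : Nat) : Int)) = List.countP q (List.range n) := by
  rw [PySem.List.pyRange_zero_natCast, List.countP_map]
  exact List.countP_congr (fun t ht => by
    simp only [Function.comp_def]
    rw [h t (List.mem_range.mp ht)])

-- the index loop over a list's range is the fold over the list (A's inner loop shape)
lemma pv_foldA (xs : List String) (init : PySem.Dict String Int) :
    (PySem.List.pyRange 0 (PySem.List.len xs)).foldl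
      (fun cart j =>
        if cart.contains (PySem.List.pyGetD xs j "") = false then
          cart.insert (PySem.List.pyGetD xs j "") 1
        else cart.insert (PySem.List.pyGetD xs j "") (cart.getD (PySem.List.pyGetD xs j "") 0 + 1))
      init
    = xs.foldl
      (fun cart x =>
        if cart.contains x = false then cart.insert x 1
        else cart.insert x (cart.getD x 0 + 1)) init := by
  have h := PySem.List.foldl_pyRange_pyGetD xs ""
    (fun cart x => if cart.contains x = false then cart.insert x 1
      else cart.insert x (cart.getD x 0 + 1)) init (le_refl 0)
  simpa using h

-- A's inner loop builds the counter of the window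
lemma pv_cart_eq (discount : List String) (D t : Nat) (ht : t + D ≤ discount.length) :
    (PySem.List.pyRange 0 ((D : Nat) : Int)).foldl
      (fun cart j =>
        if cart.contains (PySem.List.pyGetD (PySem.List.slice discount (some ((t : Nat) : Int)) (some (((D : Nat) : Int) + ((t : Nat) : Int)))) j "") = false then
          cart.insert (PySem.List.pyGetD (PySem.List.slice discount (some ((t : Nat) : Int)) (some (((D : Nat) : Int) + ((t : Nat) : Int)))) j "") 1
        else
          cart.insert (PySem.List.pyGetD (PySem.List.slice discount (some ((t : Nat) : Int)) (some (((D : Nat) : Int) + ((t : Nat) : Int)))) j "")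
            (cart.getD (PySem.List.pyGetD (PySem.List.slice discount (some ((t : Nat) : Int)) (some (((D : Nat) : Int) + ((t : Nat) : Int)))) j "") 0 + 1))
      PySem.Dict.empty
    = PySem.Dict.counter (pvWin discount D t) := by
  have hslice : PySem.List.slice discount (some ((t : Nat) : Int)) (some (((D : Nat) : Int) + ((t : Nat) : Int))) = pvWin discount D t := by
    rw [show ((D : Nat) : Int) + ((t : Nat) : Int) = (((D + t : Nat)) : Int) by push_cast; ring,
      PySem.List.slice_natCast]
    have h2 : D + t - t = D := by omega
    rw [h2]
    rfl
  have hlen : (pvWin discount D t).length = D := by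
    simp only [pvWin, List.length_take, List.length_drop]
    omega
  simp only [hslice]
  rw [show ((D : Nat) : Int) = PySem.List.len (pvWin discount D t) by rw [PySem.List.len_eq, hlen]]
  rw [pv_foldA]
  rw [PySem.List.foldl_congr_mem _ _
    (fun (d : PySem.Dict String Int) x => d.insert x (d.getD x 0 + 1)) _ ?_]
  · exact PySem.Dict.foldl_insert_getD_add_one_eq_counter _
  · intro acc x _
    by_cases hcont : acc.contains x
    · simp [hcont]
    · have hf : acc.contains x = false := by simpa using hcont
      simp [hf, PySem.Dict.getD_of_not_contains acc 0 hf]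

-- the index loop building A's want_dict is the fold over the zipped list
lemma pv_foldW (want : List String) (number : List Int) (init : PySem.Dict String Int) :
    (PySem.List.pyRange 0 (PySem.List.len (want.zip number))).foldl
      (fun acc j => acc.insert (PySem.List.pyGetD (want.zip number) j ("", 0)).1
        (PySem.List.pyGetD (want.zip number) j ("", 0)).2) init
    = (want.zip number).foldl (fun d p => d.insert p.1 p.2) init := by
  have h := PySem.List.foldl_pyRange_pyGetD (want.zip number) ("", 0)
    (fun (d : PySem.Dict String Int) p => d.insert p.1 p.2) init (le_refl 0)
  simpa using h

-- A's want_dict equals B's (zip fold)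
lemma pv_wantdict_eq (want : List String) (number : List Int) (h : want.length ≤ number.length) :
    (PySem.List.pyRange 0 (PySem.List.len want)).foldl
      (fun d i => d.insert (PySem.List.pyGetD want i "") (PySem.List.pyGetD number i 0))
      PySem.Dict.empty
    = pvW want number := by
  have hz : (want.zip number).length = want.length := by
    rw [List.length_zip]
    omega
  have hlen2 : PySem.List.len want = PySem.List.len (want.zip number) := by
    rw [PySem.List.len_eq, PySem.List.len_eq, hz]
  rw [hlen2]
  rw [PySem.List.foldl_congr_mem _ _
    (fun acc j => acc.insert (PySem.List.pyGetD (want.zip number) j ("", 0)).1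
      (PySem.List.pyGetD (want.zip number) j ("", 0)).2) _ ?_]
  · exact pv_foldW want number PySem.Dict.empty
  · intro acc x hx
    have hx' := (PySem.List.mem_pyRange_one).mp hx
    rw [PySem.List.len_eq] at hx'
    have h0 : 0 ≤ x := hx'.1
    have h1 : x < ((want.zip number).length : Int) := hx'.2
    have hxw : x < (want.length : Int) := by omega
    have hxn : x < (number.length : Int) := by
      rw [hz] at h1
      push_cast at h1 hxw ⊢
      omega
    show acc.insert (PySem.List.pyGetD want x "") (PySem.List.pyGetD number x 0)
      = acc.insert (PySem.List.pyGetD (want.zip number) x ("", 0)).1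
          (PySem.List.pyGetD (want.zip number) x ("", 0)).2
    rw [PySem.List.pyGetD_eq_getElem _ _ h0 h1,
      PySem.List.pyGetD_eq_getElem _ _ h0 hxw,
      PySem.List.pyGetD_eq_getElem _ _ h0 hxn]
    simp [List.getElem_zip]

lemma pv_W_nodup (want : List String) (number : List Int) : (pvW want number).keys.Nodup :=
  PySem.Dict.nodup_keys_foldl_insert_key _ Prod.fst (fun _ p => p.2) _ PySem.Dict.nodup_keys_empty

-- sliding the window one step changes the counts at the two boundary items
lemma pv_win_count (discount : List String) (D j : Nat) (h : j + D < discount.length) (k : String) :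
    ((pvWin discount D (j+1)).count k : Int)
    = ((pvWin discount D j).count k : Int)
      - (if k = PySem.List.pyGetD discount ((j : Nat) : Int) "" then 1 else 0)
      + (if k = PySem.List.pyGetD discount (((D : Nat) : Int) + ((j : Nat) : Int)) "" then 1 else 0) := by
  have hj : j < discount.length := by omega
  have hout : PySem.List.pyGetD discount ((j : Nat) : Int) "" = discount[j]'hj := by
    rw [PySem.List.pyGetD_eq_getElem _ _ (by positivity) (by exact_mod_cast hj)]
    simp only [Int.toNat_natCast]
  cases D with
  | zero =>
    have hz : ((0 : Nat) : Int) + ((j : Nat) : Int) = ((j : Nat) : Int) := by push_cast; ring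
    rw [hz]
    simp only [pvWin, List.take_zero, List.count_nil]
    split_ifs <;> omega
  | succ n =>
    have hin : PySem.List.pyGetD discount (((n+1 : Nat) : Int) + ((j : Nat) : Int)) "" = discount[j + (n+1)]'h := by
      rw [show ((n+1 : Nat) : Int) + ((j : Nat) : Int) = (((j + (n+1) : Nat)) : Int) by push_cast; ring]
      rw [PySem.List.pyGetD_eq_getElem _ _ (by positivity) (by exact_mod_cast h)]
      simp only [Int.toNat_natCast]
    rw [hin, hout]
    have h1 : pvWin discount (n+1) j = discount[j]'hj :: List.take n (List.drop (j+1) discount) := by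
      unfold pvWin
      rw [List.drop_eq_getElem_cons hj, List.take_succ_cons]
    have h3 : (List.drop (j+1) discount)[n]? = some (discount[j + (n+1)]'h) := by
      rw [List.getElem?_drop, show j+1+n = j + (n+1) from by omega]
      exact List.getElem?_eq_getElem h
    have h2 : pvWin discount (n+1) (j+1) = List.take n (List.drop (j+1) discount) ++ [discount[j + (n+1)]'h] := by
      unfold pvWin
      rw [List.take_succ, h3]
      rfl
    rw [h1, h2, List.count_append, List.count_cons]
    by_cases hk1 : discount[j]'hj = k <;> by_cases hk2 : discount[j + (n+1)]'h = k
    all_goals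
      have hk1' : (k = discount[j]'hj) = (discount[j]'hj = k) := by
        by_cases hh : k = discount[j]'hj <;> simp [hh, eq_comm]
      have hk2' : (k = discount[j + (n+1)]'h) = (discount[j + (n+1)]'h = k) := by
        by_cases hh : k = discount[j + (n+1)]'h <;> simp [hh, eq_comm]
    all_goals simp [hk1, hk2, hk1', hk2', List.count_nil, beq_iff_eq] <;> omega

-- the sliding phase of B
lemma pv_slide (W : PySem.Dict String Int) (discount : List String) (D : Nat)
    (hW : W.keys.Nodup) :
    ∀ (r j : Nat), D + j + r = discount.length →
    ∀ (st : PySem.Dict String Int × Int) (ans : Int),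
      pvInv W (fun k => ((pvWin discount D j).count k : Int)) st →
      ((PySem.List.pyRange ((D : Int) + (j : Int)) ((discount.length : Nat) : Int)).foldl
        (fun q i =>
          (pvChange W (pvChange W q.1 (PySem.List.pyGetD discount i "") 1) (PySem.List.pyGetD discount (i - (D : Int)) "") (-1),
           if (pvChange W (pvChange W q.1 (PySem.List.pyGetD discount i "") 1) (PySem.List.pyGetD discount (i - (D : Int)) "") (-1)).2 = 0 then q.2 + 1 else q.2))
        (st, ans)).2
      = ans + (((List.range' (j+1) r).countP (pvMatched W discount D)) : Int) := by
  intro r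
  induction r with
  | zero =>
    intro j hr st ans _
    have hnil : PySem.List.pyRange ((D : Int) + (j : Int)) ((discount.length : Nat) : Int) = [] :=
      PySem.List.pyRange_one_eq_nil (by push_cast; omega)
    rw [hnil]
    simp
  | succ n ih =>
    intro j hr st ans hinv
    have hlt : (D : Int) + (j : Int) < ((discount.length : Nat) : Int) := by push_cast; omega
    rw [PySem.List.pyRange_one_cons hlt]
    simp only [List.foldl_cons]
    rw [show (D : Int) + (j : Int) - (D : Int) = ((j : Nat) : Int) by ring]
    have hinv3 := pvChange_inv W hW _ _ (PySem.List.pyGetD discount ((j : Nat) : Int) "") (-1)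
      (pvChange_inv W hW _ _ (PySem.List.pyGetD discount ((D : Int) + (j : Int)) "") 1 hinv)
    have hg : (fun k => if k = PySem.List.pyGetD discount ((j : Nat) : Int) "" then
          (if k = PySem.List.pyGetD discount ((D : Int) + (j : Int)) "" then
            ((pvWin discount D j).count k : Int) + 1
          else ((pvWin discount D j).count k : Int)) + (-1)
        else (if k = PySem.List.pyGetD discount ((D : Int) + (j : Int)) "" then
            ((pvWin discount D j).count k : Int) + 1
          else ((pvWin discount D j).count k : Int)))
        = (fun k => ((pvWin discount D (j+1)).count k : Int)) := by
      funext k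
      have hDj : ((D : Nat) : Int) + ((j : Nat) : Int) = (D : Int) + (j : Int) := by push_cast; ring
      have hcnt := pv_win_count discount D j (by omega) k
      rw [hDj] at hcnt
      split_ifs at hcnt ⊢ <;> omega
    rw [hg] at hinv3
    have hmatch := pv_match_iff W discount D (j+1)
      (pvChange W (pvChange W st (PySem.List.pyGetD discount ((D : Int) + (j : Int)) "") 1)
        (PySem.List.pyGetD discount ((j : Nat) : Int) "") (-1)) hinv3
    have happ := ih (j+1) (by omega)
      (pvChange W (pvChange W st (PySem.List.pyGetD discount ((D : Int) + (j : Int)) "") 1)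
        (PySem.List.pyGetD discount ((j : Nat) : Int) "") (-1))
      (if (pvChange W (pvChange W st (PySem.List.pyGetD discount ((D : Int) + (j : Int)) "") 1)
        (PySem.List.pyGetD discount ((j : Nat) : Int) "") (-1)).2 = 0 then ans + 1 else ans)
      hinv3
    rw [show (D : Int) + ((j+1 : Nat) : Int) = (D : Int) + (j : Int) + 1 by push_cast; ring] at happ
    rw [happ, List.range'_succ, List.countP_cons]
    by_cases hb : (pvChange W (pvChange W st (PySem.List.pyGetD discount ((D : Int) + (j : Int)) "") 1)
        (PySem.List.pyGetD discount ((j : Nat) : Int) "") (-1)).2 = 0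
    · rw [if_pos hb, if_pos (hmatch.mp hb)]
      push_cast
      ring
    · rw [if_neg hb, if_neg (fun hm => hb (hmatch.mpr hm))]
      push_cast
      ring

-- B's initial fill of the window preserves the invariant
lemma pv_fold_add (W : PySem.Dict String Int) (hW : W.keys.Nodup) (l : List String) :
    ∀ (c : String → Int) (st : PySem.Dict String Int × Int), pvInv W c st →
    pvInv W (fun k => c k + (l.count k : Int)) (l.foldl (fun st item => pvChange W st item 1) st) := by
  induction l with
  | nil =>
    intro c st h
    simpa using h
  | cons x t ih =>
    intro c st h
    have h1 := pvChange_inv W hW c st x 1 h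
    have h2 := ih _ _ h1
    have hg : (fun k => (if k = x then c k + 1 else c k) + (t.count k : Int))
        = (fun k => c k + (((x :: t).count k : Nat) : Int)) := by
      funext k
      have e : ((x == k) = true) ↔ (k = x) := by
        constructor <;> intro hh
        · exact (beq_iff_eq.mp hh).symm
        · exact beq_iff_eq.mpr hh.symm
      have hcc : (((x :: t).count k : Nat) : Int) = ((t.count k : Nat) : Int) + (if k = x then 1 else 0) := by
        rw [List.count_cons]
        push_cast
        rw [if_congr e rfl rfl]
      rw [hcc]
      split_ifs <;> omega
    rw [List.foldl_cons]
    rw [hg] at h2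
    exact h2

-- ===== VERDICT (by name: the statement is the Claim_ definition above) =====
theorem solution_spec : Claim_equal_solution := by
  intro want number discount _ hpre
  unfold Spec_solution
  simp only [solution, solution_alt]
  rw [pv_wantdict_eq want number hpre.1, PySem.List.len_eq discount]
  rw [show List.foldl (fun (d : PySem.Dict String Int) (p : String × Int) => d.insert p.1 p.2)
      PySem.Dict.empty (want.zip number) = pvW want number from rfl]
  by_cases hwin : ((discount.length : Nat) : Int) - number.sum + 1 ≤ 0
  · rw [if_pos hwin]
    have hnil : PySem.List.pyRange 0 (((discount.length : Nat) : Int) - number.sum + 1) = [] :=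
      PySem.List.pyRange_one_eq_nil hwin
    rw [hnil]
    rfl
  · rw [if_neg hwin]
    have hsum0 : (0:Int) ≤ number.sum := hpre.2
    have hDs : ((number.sum.toNat : Nat) : Int) = number.sum := Int.toNat_of_nonneg hsum0
    rw [← hDs]
    set D := number.sum.toNat with hDdef
    have hDL : D ≤ discount.length := by omega
    have hWnd := pv_W_nodup want number
    -- the initial state satisfies the invariant for the empty window
    have hinv0 : pvInv (pvW want number) (fun _ => (0:Int))
        (PySem.Dict.empty, (((pvW want number).size : Nat) : Int)) := by
      refine ⟨PySem.Dict.nodup_keys_empty, fun k => by simp [PySem.Dict.get?_empty], ?_⟩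
      show (((pvW want number).size : Nat) : Int) = pvBad (pvW want number) PySem.Dict.empty
      unfold pvBad
      have hcnt : (pvW want number).keys.countP
          (fun k => (PySem.Dict.empty : PySem.Dict String Int).get? k != (pvW want number).get? k)
          = (pvW want number).keys.length :=
        List.countP_eq_length.mpr (fun k hk => by
          rw [pv_get?_eq_some_getD _ _ ((PySem.Dict.contains_iff_mem_keys _ _).mpr hk)]
          simp [PySem.Dict.get?_empty])
      rw [hcnt]
      simp [PySem.Dict.size, PySem.Dict.keys, PySem.Dict.keys_empty]
    have hslice0 : PySem.List.slice discount none (some ((D : Nat) : Int)) = pvWin discount D 0 := by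
      rw [PySem.List.slice_to discount (b := ((D : Nat) : Int)) (by positivity)]
      simp [pvWin]
    rw [hslice0]
    have hinv1' := pv_fold_add (pvW want number) hWnd (pvWin discount D 0) _ _ hinv0
    have hzero : (fun k => (0:Int) + (((pvWin discount D 0).count k : Nat) : Int))
        = (fun k => (((pvWin discount D 0).count k : Nat) : Int)) := by
      funext k
      ring
    rw [hzero] at hinv1'
    -- A's loop as a count of matching windows
    rw [show ((discount.length : Nat) : Int) - ((D : Nat) : Int) + 1 = (((discount.length - D + 1 : Nat)) : Int) by push_cast; omega]
    conv_lhs => rw [PySem.List.foldl_count_if]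
    rw [pv_countP_pyRange _ (pvMatched (pvW want number) discount D) (discount.length - D + 1)
      (fun t ht => by
        simp only [pv_cart_eq discount D t (by omega)]
        rfl)]
    -- B's loop via the sliding invariant
    have hmatch0 := pv_match_iff (pvW want number) discount D 0
      ((pvWin discount D 0).foldl (fun st item => pvChange (pvW want number) st item 1)
        (PySem.Dict.empty, (((pvW want number).size : Nat) : Int))) hinv1'
    have hs := pv_slide (pvW want number) discount D hWnd (discount.length - D) 0 (by omega)
      ((pvWin discount D 0).foldl (fun st item => pvChange (pvW want number) st item 1)
        (PySem.Dict.empty, (((pvW want number).size : Nat) : Int)))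
      (if ((pvWin discount D 0).foldl (fun st item => pvChange (pvW want number) st item 1)
        (PySem.Dict.empty, (((pvW want number).size : Nat) : Int))).2 = 0 then 1 else 0)
      hinv1'
    rw [show (D : Int) + ((0 : Nat) : Int) = ((D : Nat) : Int) by simp] at hs
    rw [hs]
    rw [List.range_eq_range', List.range'_succ, List.countP_cons]
    by_cases hm : pvMatched (pvW want number) discount D 0 = true
    · rw [if_pos (hmatch0.mpr hm), if_pos hm]
      push_cast
      ring
    · rw [if_neg (fun hh => hm (hmatch0.mp hh)), if_neg hm]
      push_cast
      ring
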